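-- pv_equiv track=rewrite | github.com/AlexandrMolyavin/CodeWars | 6_kyu/Game Hit the target - 2nd part.py | solution
-- ===== SOURCE A (Python) =====
-- def solution(mtrx):
--     for i in range(len(mtrx)):
--         for j in range(len(mtrx)):
--             if mtrx[i][j] == '^':
--                 for k in range(0,i):
--                     if mtrx[k][j] == 'x':
--                         return True
--                 return False
--             elif mtrx[i][j] == '>':
--                 if 'x' in mtrx[i][j+1:]:
--                     return True
--                 else:
--                     return False
--             elif mtrx[i][j] == '<':
--                 if 'x' in mtrx[i][0:j]:
--                     return True
--                 else:
--                     return False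
--             elif mtrx[i][j] == 'v':
--                 for k in range(i+1,len(mtrx)):
--                     if mtrx[k][j] == 'x':
--                         return True
--                 return False
-- ===== SOURCE B (Python) =====
-- def solution(mtrx):
--     n = len(mtrx)
--     deltas = {'^': (-1, 0), 'v': (1, 0), '>': (0, 1), '<': (0, -1)}
--     found = None
--     for i in range(n):
--         for j in range(n):
--             if mtrx[i][j] in deltas:
--                 found = (i, j, deltas[mtrx[i][j]])
--                 break
--         if found is not None:
--             break
--     if found is None:
--         return None
--     i, j, (di, dj) = found
--     i += di
--     j += dj
--     while 0 <= i < n and 0 <= j < len(mtrx[i]):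
--         if mtrx[i][j] == 'x':
--             return True
--         i += di
--         j += dj
--     return False
-- ===== Notes on version B (the rewrite author's own statement) =====
-- stated objective: simpler
-- what changed: Replaces A's four per-direction branch bodies (two index loops, two slice membership tests) by one table of direction deltas and a single uniform ray walk from the arrow, stepping by the delta while inside the grid.
-- outside the precondition, e.g. on solution([['>', 'x'], ['a']]): A returns True, B returns True; on solution([['.']]): A returns None, B returns None
import Mathlib
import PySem

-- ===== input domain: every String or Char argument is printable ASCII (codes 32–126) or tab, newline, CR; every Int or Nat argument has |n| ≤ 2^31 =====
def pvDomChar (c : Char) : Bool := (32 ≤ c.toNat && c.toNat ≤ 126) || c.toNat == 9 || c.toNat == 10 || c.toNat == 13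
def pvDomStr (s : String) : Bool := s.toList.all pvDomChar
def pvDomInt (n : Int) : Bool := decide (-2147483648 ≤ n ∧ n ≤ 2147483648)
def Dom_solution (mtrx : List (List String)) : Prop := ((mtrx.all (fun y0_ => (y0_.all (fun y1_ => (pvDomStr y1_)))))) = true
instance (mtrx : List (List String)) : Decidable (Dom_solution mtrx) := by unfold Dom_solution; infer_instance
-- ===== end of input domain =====

-- B replaces A's four per-direction branch bodies by one delta table and a single
-- uniform ray walk (objective: simpler). Return-value equivalence only; no mutation.

-- ===== PORT A =====
-- mtrx[i][j] on in-range nonnegative indices (guaranteed inside Pre_): plain getD.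
def pvCell (mtrx : List (List String)) (i j : Nat) : String :=
  (mtrx.getD i []).getD j ""

-- inner 'for j in range(len(mtrx))' loop of A, returning some b at a 'return b', none to continue
def pvInnerA (mtrx : List (List String)) (i : Nat) : List Nat → Option Bool
  | [] => none
  | j :: js =>
    if pvCell mtrx i j = "^" then
      -- for k in range(0,i): if mtrx[k][j]=='x': return True; return False
      some ((List.range i).any (fun k => pvCell mtrx k j = "x"))
    else if pvCell mtrx i j = ">" then
      -- 'x' in mtrx[i][j+1:]  (slice with nonneg start = drop)
      some (((mtrx.getD i []).drop (j + 1)).contains "x")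
    else if pvCell mtrx i j = "<" then
      -- 'x' in mtrx[i][0:j]  (slice with nonneg bounds = take)
      some (((mtrx.getD i []).take j).contains "x")
    else if pvCell mtrx i j = "v" then
      -- for k in range(i+1,len(mtrx)): if mtrx[k][j]=='x': return True; return False
      some ((List.range' (i + 1) (mtrx.length - (i + 1))).any (fun k => pvCell mtrx k j = "x"))
    else pvInnerA mtrx i js

-- outer 'for i in range(len(mtrx))' loop of A
def pvOuterA (mtrx : List (List String)) : List Nat → Option Bool
  | [] => none
  | i :: is =>
    match pvInnerA mtrx i (List.range mtrx.length) with
    | some b => some b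
    | none => pvOuterA mtrx is

-- Python A falls off the end and returns None when no arrow is found; that case is
-- outside Pre_solution and is represented by false here.
def solution (mtrx : List (List String)) : Bool :=
  (pvOuterA mtrx (List.range mtrx.length)).getD false

-- ===== PORT B =====
def pvDeltas : PySem.Dict String (Int × Int) :=
  PySem.Dict.ofList [("^", (-1, 0)), ("v", (1, 0)), (">", (0, 1)), ("<", (0, -1))]

-- inner scan of B: first j in the list whose cell is an arrow, with its delta
def pvFindJ (mtrx : List (List String)) (i : Nat) : List Nat → Option (Nat × (Int × Int))
  | [] => none
  | j :: js =>
    match pvDeltas.get? (pvCell mtrx i j) with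
    | some d => some (j, d)
    | none => pvFindJ mtrx i js

-- outer scan of B
def pvFindArrow (mtrx : List (List String)) : List Nat → Option (Nat × Nat × (Int × Int))
  | [] => none
  | i :: is =>
    match pvFindJ mtrx i (List.range mtrx.length) with
    | some (j, d) => some (i, j, d)
    | none => pvFindArrow mtrx is

-- Python B's while-loop is unbounded; this fuel (grid height + arrow row width + 1)
-- is a totality guard only — it strictly exceeds the number of steps any ray can take.
def pvFuel (mtrx : List (List String)) (i : Nat) : Nat :=
  mtrx.length + (mtrx.getD i []).length + 1

-- the ray walk: while 0 <= i < n and 0 <= j < len(mtrx[i]): check 'x', step by (di,dj)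
-- (indices are nonnegative whenever the row access happens, so .toNat is exact there)
def pvWalkB (mtrx : List (List String)) (di dj : Int) : Int → Int → Nat → Bool
  | _, _, 0 => false
  | i, j, fuel + 1 =>
    if 0 ≤ i ∧ i < (mtrx.length : Int) ∧ 0 ≤ j ∧ j < ((mtrx.getD i.toNat []).length : Int) then
      if pvCell mtrx i.toNat j.toNat = "x" then true
      else pvWalkB mtrx di dj (i + di) (j + dj) fuel
    else false

-- Python B returns None when no arrow is found (outside Pre_solution); false here.
def solution_alt (mtrx : List (List String)) : Bool :=
  match pvFindArrow mtrx (List.range mtrx.length) with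
  | none => false
  | some (i, j, (di, dj)) =>
      pvWalkB mtrx di dj ((i : Int) + di) ((j : Int) + dj) (pvFuel mtrx i)

-- ===== PRECONDITION & SPEC =====
-- Pre_ excludes grids with a row shorter than the grid height (A indexes mtrx[i][j] for
-- j in range(len(mtrx)) and may raise IndexError) and grids with no arrow in the
-- len(mtrx) x len(mtrx) region (A falls through and returns None, not a bool).
def Pre_solution (mtrx : List (List String)) : Prop :=
  (∀ row ∈ mtrx, mtrx.length ≤ row.length) ∧
  (∃ i ∈ List.range mtrx.length, ∃ j ∈ List.range mtrx.length,
      pvCell mtrx i j ∈ (["^", ">", "<", "v"] : List String))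
instance (mtrx : List (List String)) : Decidable (Pre_solution mtrx) := by
  unfold Pre_solution; infer_instance

def pvWitness_solution : List (List String) := [[">", "x"], [".", "."]]

def Spec_solution (mtrx : List (List String)) (out : Bool) : Prop := out = solution_alt mtrx
instance (mtrx : List (List String)) (out : Bool) : Decidable (Spec_solution mtrx out) := by
  unfold Spec_solution; infer_instance

-- ===== CLAIM (what is proved, stated in full; the proofs are below) =====
def Claim_equal_solution : Prop :=
  ∀ (mtrx : List (List String)), Dom_solution mtrx → Pre_solution mtrx →
    Spec_solution mtrx (solution mtrx)

-- ===== LEMMAS AND PROOFS =====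

theorem pvWalkB_succ (mtrx : List (List String)) (di dj i j : Int) (f : Nat) :
    pvWalkB mtrx di dj i j (f + 1) =
      if 0 ≤ i ∧ i < (mtrx.length : Int) ∧ 0 ≤ j ∧ j < ((mtrx.getD i.toNat []).length : Int) then
        if pvCell mtrx i.toNat j.toNat = "x" then true
        else pvWalkB mtrx di dj (i + di) (j + dj) f
      else false := rfl

theorem pv_row_len {mtrx : List (List String)}
    (H : ∀ row ∈ mtrx, mtrx.length ≤ row.length) {i : Nat} (hi : i < mtrx.length) :
    mtrx.length ≤ (mtrx.getD i []).length := by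
  rw [List.getD_eq_getElem mtrx [] hi]
  exact H _ (List.getElem_mem hi)

-- '^' ray: walking up from i-1 sees exactly the cells k < i in column j
theorem pv_walk_up {mtrx : List (List String)}
    (H : ∀ row ∈ mtrx, mtrx.length ≤ row.length) {j : Nat} (hj : j < mtrx.length) :
    ∀ (i fuel : Nat), i ≤ fuel → i ≤ mtrx.length →
      pvWalkB mtrx (-1) 0 ((i : Int) - 1) (j : Int) fuel
        = (List.range i).any (fun k => pvCell mtrx k j = "x") := by
  intro i
  induction i with
  | zero =>
    intro fuel _ _
    cases fuel with
    | zero => simp [pvWalkB]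
    | succ f => simp [pvWalkB]
  | succ i ih =>
    intro fuel hfuel hle
    obtain ⟨f, rfl⟩ := Nat.exists_eq_add_of_le hfuel
    have hi : i < mtrx.length := Nat.lt_of_lt_of_le (Nat.lt_succ_self i) hle
    have hcast : ((i + 1 : Nat) : Int) - 1 = (i : Int) := by push_cast; ring
    rw [hcast, show i + 1 + f = (i + f) + 1 from by omega]
    have hguard : 0 ≤ (i : Int) ∧ (i : Int) < (mtrx.length : Int) ∧ 0 ≤ (j : Int) ∧
        (j : Int) < (((mtrx.getD ((i : Int)).toNat []).length : Nat) : Int) := by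
      refine ⟨by positivity, by exact_mod_cast hi, by positivity, ?_⟩
      have := pv_row_len H hi
      simp only [Int.toNat_natCast]
      exact_mod_cast Nat.lt_of_lt_of_le hj this
    rw [pvWalkB_succ, if_pos hguard]
    simp only [Int.toNat_natCast]
    have hstep : (i : Int) + -1 = (i : Int) - 1 := by ring
    have hstep2 : (j : Int) + 0 = (j : Int) := by ring
    rw [hstep, hstep2, ih (i + f) (Nat.le_add_right i f) (Nat.le_of_lt hi)]
    by_cases hx : pvCell mtrx i j = "x" <;>
      simp [hx, List.range_succ, Bool.or_comm]

-- 'v' ray: walking down from i sees exactly the cells in range' i d, column j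
theorem pv_walk_down {mtrx : List (List String)}
    (H : ∀ row ∈ mtrx, mtrx.length ≤ row.length) {j : Nat} (hj : j < mtrx.length) :
    ∀ (d : Nat) (i fuel : Nat), d ≤ fuel → i + d = mtrx.length →
      pvWalkB mtrx 1 0 (i : Int) (j : Int) fuel
        = (List.range' i d).any (fun k => pvCell mtrx k j = "x") := by
  intro d
  induction d with
  | zero =>
    intro i fuel _ hsum
    have hni : i = mtrx.length := by omega
    have hguard : ¬(0 ≤ (i : Int) ∧ (i : Int) < (mtrx.length : Int) ∧ 0 ≤ (j : Int) ∧
        (j : Int) < (((mtrx.getD ((i : Int)).toNat []).length : Nat) : Int)) := by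
      intro ⟨_, h2, _, _⟩
      rw [hni] at h2
      exact absurd h2 (by omega)
    cases fuel with
    | zero => simp [pvWalkB]
    | succ f => rw [pvWalkB_succ, if_neg hguard]; simp
  | succ d ih =>
    intro i fuel hfuel hsum
    obtain ⟨f, rfl⟩ := Nat.exists_eq_add_of_le hfuel
    rw [show d + 1 + f = (d + f) + 1 from by omega]
    have hi : i < mtrx.length := by omega
    have hguard : 0 ≤ (i : Int) ∧ (i : Int) < (mtrx.length : Int) ∧ 0 ≤ (j : Int) ∧
        (j : Int) < (((mtrx.getD ((i : Int)).toNat []).length : Nat) : Int) := by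
      refine ⟨by positivity, by exact_mod_cast hi, by positivity, ?_⟩
      have := pv_row_len H hi
      simp only [Int.toNat_natCast]
      exact_mod_cast Nat.lt_of_lt_of_le hj this
    rw [pvWalkB_succ, if_pos hguard]
    simp only [Int.toNat_natCast]
    have hstep : (i : Int) + 1 = ((i + 1 : Nat) : Int) := by push_cast; ring
    have hstep2 : (j : Int) + 0 = (j : Int) := by ring
    rw [hstep, hstep2, ih (i + 1) (d + f) (Nat.le_add_right d f) (by omega)]
    by_cases hx : pvCell mtrx i j = "x" <;> simp [hx, List.range'_succ]

-- '>' ray: walking right from j sees exactly (row i).drop j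
theorem pv_walk_right {mtrx : List (List String)} {i : Nat} (hi : i < mtrx.length) :
    ∀ (d : Nat) (j fuel : Nat), d ≤ fuel → j + d = (mtrx.getD i []).length →
      pvWalkB mtrx 0 1 (i : Int) (j : Int) fuel
        = ((mtrx.getD i []).drop j).contains "x" := by
  intro d
  induction d with
  | zero =>
    intro j fuel _ hsum
    have hguard : ¬(0 ≤ (i : Int) ∧ (i : Int) < (mtrx.length : Int) ∧ 0 ≤ (j : Int) ∧
        (j : Int) < (((mtrx.getD ((i : Int)).toNat []).length : Nat) : Int)) := by
      intro ⟨_, _, _, h4⟩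
      simp only [Int.toNat_natCast] at h4
      have : j < (mtrx.getD i []).length := by exact_mod_cast h4
      omega
    have hdrop : (mtrx.getD i []).drop j = [] := List.drop_eq_nil_of_le (by omega)
    rw [hdrop]
    cases fuel with
    | zero => rfl
    | succ f => rw [pvWalkB_succ, if_neg hguard]; rfl
  | succ d ih =>
    intro j fuel hfuel hsum
    obtain ⟨f, rfl⟩ := Nat.exists_eq_add_of_le hfuel
    have hj : j < (mtrx.getD i []).length := by omega
    have hguard : 0 ≤ (i : Int) ∧ (i : Int) < (mtrx.length : Int) ∧ 0 ≤ (j : Int) ∧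
        (j : Int) < (((mtrx.getD ((i : Int)).toNat []).length : Nat) : Int) := by
      exact ⟨by positivity, by exact_mod_cast hi, by positivity,
        by simp only [Int.toNat_natCast]; exact_mod_cast hj⟩
    rw [show d + 1 + f = (d + f) + 1 from by omega, pvWalkB_succ, if_pos hguard]
    simp only [Int.toNat_natCast]
    have hstep : (i : Int) + 0 = (i : Int) := by ring
    have hstep2 : (j : Int) + 1 = ((j + 1 : Nat) : Int) := by push_cast; ring
    rw [hstep, hstep2, ih (j + 1) (d + f) (Nat.le_add_right d f) (by omega)]
    have hR : (List.drop j (mtrx.getD i [])).contains "x"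
        = (("x" == (mtrx.getD i [])[j])
            || (List.drop (j + 1) (mtrx.getD i [])).contains "x") := by
      rw [List.drop_eq_getElem_cons hj, List.contains_cons]
    have hcell : pvCell mtrx i j = (mtrx.getD i [])[j] := by
      unfold pvCell
      rw [List.getD_eq_getElem (mtrx.getD i []) "" hj]
    rw [hR]
    simp only [hcell]
    by_cases hx : (mtrx.getD i [])[j] = "x"
    · rw [if_pos hx, hx]
      simp
    · have hx' : ("x" == (mtrx.getD i [])[j]) = false :=
        beq_eq_false_iff_ne.mpr (fun h => hx h.symm)
      rw [if_neg hx, hx', Bool.false_or]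

-- '<' ray: walking left from j-1 sees exactly (row i).take j
theorem pv_walk_left {mtrx : List (List String)} {i : Nat} (hi : i < mtrx.length) :
    ∀ (j fuel : Nat), j ≤ fuel → j ≤ (mtrx.getD i []).length →
      pvWalkB mtrx 0 (-1) (i : Int) ((j : Int) - 1) fuel
        = ((mtrx.getD i []).take j).contains "x" := by
  intro j
  induction j with
  | zero =>
    intro fuel _ _
    cases fuel with
    | zero => simp [pvWalkB]
    | succ f =>
      have hguard : ¬(0 ≤ (i : Int) ∧ (i : Int) < (mtrx.length : Int) ∧
          0 ≤ ((0 : Nat) : Int) - 1 ∧ ((0 : Nat) : Int) - 1 <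
            (((mtrx.getD ((i : Int)).toNat []).length : Nat) : Int)) := by
        intro ⟨_, _, h3, _⟩
        omega
      rw [pvWalkB_succ, if_neg hguard]; simp
  | succ j ih =>
    intro fuel hfuel hle
    obtain ⟨f, rfl⟩ := Nat.exists_eq_add_of_le hfuel
    have hj : j < (mtrx.getD i []).length := by omega
    have hcast : ((j + 1 : Nat) : Int) - 1 = (j : Int) := by push_cast; ring
    rw [hcast]
    have hguard : 0 ≤ (i : Int) ∧ (i : Int) < (mtrx.length : Int) ∧ 0 ≤ (j : Int) ∧
        (j : Int) < (((mtrx.getD ((i : Int)).toNat []).length : Nat) : Int) := by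
      exact ⟨by positivity, by exact_mod_cast hi, by positivity,
        by simp only [Int.toNat_natCast]; exact_mod_cast hj⟩
    rw [show j + 1 + f = (j + f) + 1 from by omega, pvWalkB_succ, if_pos hguard]
    simp only [Int.toNat_natCast]
    have hstep : (i : Int) + 0 = (i : Int) := by ring
    have hstep2 : (j : Int) + -1 = (j : Int) - 1 := by ring
    rw [hstep, hstep2, ih (j + f) (Nat.le_add_right j f) (Nat.le_of_lt hj)]
    have hT : (List.take (j + 1) (mtrx.getD i [])).contains "x"
        = ((List.take j (mtrx.getD i [])).contains "x"
            || ("x" == (mtrx.getD i [])[j])) := by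
      rw [List.take_succ, List.getElem?_eq_getElem hj]
      simp only [List.contains_append, Option.toList_some, List.contains_cons,
        List.contains_nil, Bool.or_false]
    have hcell : pvCell mtrx i j = (mtrx.getD i [])[j] := by
      unfold pvCell
      rw [List.getD_eq_getElem (mtrx.getD i []) "" hj]
    rw [hT]
    simp only [hcell]
    by_cases hx : (mtrx.getD i [])[j] = "x"
    · rw [if_pos hx, hx]
      simp
    · have hx' : ("x" == (mtrx.getD i [])[j]) = false :=
        beq_eq_false_iff_ne.mpr (fun h => hx h.symm)
      rw [if_neg hx, hx', Bool.or_false]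

-- evaluate the delta-table lookup on an arbitrary string
theorem pv_deltas_get (s : String) :
    pvDeltas.get? s =
      if s = "^" then some (-1, 0)
      else if s = "v" then some (1, 0)
      else if s = ">" then some (0, 1)
      else if s = "<" then some (0, -1)
      else none := by
  have h : pvDeltas = PySem.Dict.mk
      [("^", ((-1 : Int), (0 : Int))), ("v", (1, 0)), (">", (0, 1)), ("<", (0, -1))] := by
    decide
  rw [h]
  simp only [PySem.Dict.get?_mk_cons]
  by_cases h1 : s = "^"
  · simp [h1]
  · by_cases h2 : s = "v"
    · simp [h2, eq_comm]
    · by_cases h3 : s = ">"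
      · simp [h3, eq_comm]
      · by_cases h4 : s = "<"
        · simp [h4, eq_comm]
        · simp [h1, h2, h3, h4, Ne.symm h1, Ne.symm h2, Ne.symm h3, Ne.symm h4,
            PySem.Dict.get?]

-- the walk applied to a found arrow, as a function (shape of solution_alt's match arm)
def pvRun (mtrx : List (List String)) (x : Nat × Nat × (Int × Int)) : Bool :=
  pvWalkB mtrx x.2.2.1 x.2.2.2 ((x.1 : Int) + x.2.2.1) ((x.2.1 : Int) + x.2.2.2)
    (pvFuel mtrx x.1)

-- A's inner loop equals B's inner find followed by the ray walk
theorem pv_inner_eq {mtrx : List (List String)}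
    (H : ∀ row ∈ mtrx, mtrx.length ≤ row.length) {i : Nat} (hi : i < mtrx.length) :
    ∀ (js : List Nat), (∀ j ∈ js, j < mtrx.length) →
      pvInnerA mtrx i js = (pvFindJ mtrx i js).map (fun x => pvRun mtrx (i, x)) := by
  intro js
  induction js with
  | nil => intro _; simp [pvInnerA, pvFindJ]
  | cons j js ih =>
    intro hjs
    have hj : j < mtrx.length := hjs j (List.mem_cons_self ..)
    have hw : mtrx.length ≤ (mtrx.getD i []).length := pv_row_len H hi
    have hfuel : pvFuel mtrx i = mtrx.length + (mtrx.getD i []).length + 1 := rfl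
    rw [pvInnerA, pvFindJ, pv_deltas_get]
    by_cases h1 : pvCell mtrx i j = "^"
    · rw [if_pos h1, if_pos h1]
      simp only [Option.map_some, pvRun]
      have : ((i : Int) + (-1)) = (i : Int) - 1 := by ring
      rw [this]
      have : ((j : Int) + 0) = (j : Int) := by ring
      rw [this]
      rw [pv_walk_up H hj i (pvFuel mtrx i) (by rw [hfuel]; omega) (Nat.le_of_lt hi)]
    · rw [if_neg h1, if_neg h1]
      by_cases h2 : pvCell mtrx i j = ">"
      · have h2v : ¬ pvCell mtrx i j = "v" := by rw [h2]; decide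
        rw [if_pos h2, if_neg h2v, if_pos h2]
        simp only [Option.map_some, pvRun]
        have e1 : ((i : Int) + 0) = (i : Int) := by ring
        have e2 : ((j : Int) + 1) = ((j + 1 : Nat) : Int) := by push_cast; ring
        rw [e1, e2]
        rw [pv_walk_right hi ((mtrx.getD i []).length - (j + 1)) (j + 1) (pvFuel mtrx i)
          (by rw [hfuel]; omega) (by omega)]
      · by_cases h3 : pvCell mtrx i j = "<"
        · have h3v : ¬ pvCell mtrx i j = "v" := by rw [h3]; decide
          rw [if_neg h2, if_pos h3, if_neg h3v, if_neg h2, if_pos h3]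
          simp only [Option.map_some, pvRun]
          have e1 : ((i : Int) + 0) = (i : Int) := by ring
          have e2 : ((j : Int) + (-1)) = (j : Int) - 1 := by ring
          rw [e1, e2]
          rw [pv_walk_left hi j (pvFuel mtrx i) (by rw [hfuel]; omega)
            (Nat.le_of_lt (Nat.lt_of_lt_of_le hj hw))]
        · by_cases h4 : pvCell mtrx i j = "v"
          · rw [if_neg h2, if_neg h3, if_pos h4, if_pos h4]
            simp only [Option.map_some, pvRun]
            have e1 : ((i : Int) + 1) = ((i + 1 : Nat) : Int) := by push_cast; ring
            have e2 : ((j : Int) + 0) = (j : Int) := by ring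
            rw [e1, e2]
            rw [pv_walk_down H hj (mtrx.length - (i + 1)) (i + 1) (pvFuel mtrx i)
              (by rw [hfuel]; omega) (by omega)]
          · rw [if_neg h2, if_neg h3, if_neg h4, if_neg h4, if_neg h2, if_neg h3]
            exact ih (fun x hx => hjs x (List.mem_cons_of_mem _ hx))

-- A's outer loop equals B's outer find followed by the ray walk
theorem pv_outer_eq {mtrx : List (List String)}
    (H : ∀ row ∈ mtrx, mtrx.length ≤ row.length) :
    ∀ (is : List Nat), (∀ i ∈ is, i < mtrx.length) →
      pvOuterA mtrx is = (pvFindArrow mtrx is).map (pvRun mtrx) := by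
  intro is
  induction is with
  | nil => intro _; simp [pvOuterA, pvFindArrow]
  | cons i is ih =>
    intro his
    have hi : i < mtrx.length := his i (List.mem_cons_self ..)
    rw [pvOuterA, pvFindArrow,
      pv_inner_eq H hi (List.range mtrx.length) (fun j hj => List.mem_range.mp hj)]
    cases hfind : pvFindJ mtrx i (List.range mtrx.length) with
    | none =>
      simp only [Option.map_none]
      exact ih (fun x hx => his x (List.mem_cons_of_mem _ hx))
    | some x =>
      obtain ⟨j, d⟩ := x
      simp [pvRun]

-- ===== VERDICT (by name: the statement is the Claim_ definition above) =====
theorem solution_spec : Claim_equal_solution := by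
  intro mtrx _ hpre
  unfold Spec_solution solution solution_alt
  rw [pv_outer_eq hpre.1 (List.range mtrx.length) (fun i hi => List.mem_range.mp hi)]
  cases hfind : pvFindArrow mtrx (List.range mtrx.length) with
  | none => rfl
  | some x =>
    obtain ⟨i, j, di, dj⟩ := x
    simp [pvRun]
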